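-- pv_equiv track=rewrite | github.com/Wilsonnijc-bot/Claw-Insurance | nanobot/skills/insurance-product-advisor/scripts/product_catalog.py | subtype_score
-- ===== SOURCE A (Python) =====
-- from typing import Any
--
-- NON_LIFE_SUBTYPE_KEYWORDS = {
--     "personal accident": ["accident", "injury", "意外"],
--     "personal liability": ["liability", "責任", "home liability", "家居責任"],
--     "domestic worker insurance": ["domestic worker", "helper", "maid", "外傭", "工人"],
--     "domestic helper insurance": ["domestic worker", "helper", "maid", "外傭", "工人"],
--     "golf insurance": ["golf", "高爾夫"],
-- }
--
-- def subtype_score(subtype: str | None, row: dict[str, Any], text: str, reasons: list[str]) -> int: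
--     if not subtype:
--         return 0
--     lowered = subtype.casefold()
--     best = 0
--     for category, keywords in NON_LIFE_SUBTYPE_KEYWORDS.items():
--         if any(keyword in lowered for keyword in keywords):
--             if row.get("plan_category", "").casefold() == category:
--                 reasons.append(f"matches requested non-life subtype: {category}")
--                 return 4
--             if any(keyword in text for keyword in keywords):
--                 best = max(best, 2)
--     if best:
--         reasons.append("text partially matches requested non-life subtype")
--         return best
--     reasons.append("subtype does not align strongly with this row")
--     return -2
-- ===== SOURCE B (Python) =====
-- NON_LIFE_SUBTYPE_KEYWORDS = {
--     "personal accident": ["accident", "injury", "意外"],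
--     "personal liability": ["liability", "責任", "home liability", "家居責任"],
--     "domestic worker insurance": ["domestic worker", "helper", "maid", "外傭", "工人"],
--     "domestic helper insurance": ["domestic worker", "helper", "maid", "外傭", "工人"],
--     "golf insurance": ["golf", "高爾夫"],
-- }
--
-- def subtype_score(subtype, row, text, reasons):
--     if not subtype:
--         return 0
--     lowered = subtype.casefold()
--     plan_cat = row.get("plan_category", "").casefold()
--     kws = NON_LIFE_SUBTYPE_KEYWORDS.get(plan_cat)
--     if kws is not None and any(k in lowered for k in kws):
--         reasons.append(f"matches requested non-life subtype: {plan_cat}")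
--         return 4
--     if any(any(k in lowered for k in kw) and any(k in text for k in kw)
--            for kw in NON_LIFE_SUBTYPE_KEYWORDS.values()):
--         reasons.append("text partially matches requested non-life subtype")
--         return 2
--     reasons.append("subtype does not align strongly with this row")
--     return -2
-- ===== Notes on version B (the rewrite author's own statement) =====
-- stated objective: simpler
-- what changed: A's single interleaved loop over all categories (testing the exact plan-category match and accumulating a partial-match flag per iteration) is replaced by a direct dictionary lookup keyed on the row's casefolded plan_category for the exact-match case, followed by one separate any() pass for the partial-match case.
import Mathlib
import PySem

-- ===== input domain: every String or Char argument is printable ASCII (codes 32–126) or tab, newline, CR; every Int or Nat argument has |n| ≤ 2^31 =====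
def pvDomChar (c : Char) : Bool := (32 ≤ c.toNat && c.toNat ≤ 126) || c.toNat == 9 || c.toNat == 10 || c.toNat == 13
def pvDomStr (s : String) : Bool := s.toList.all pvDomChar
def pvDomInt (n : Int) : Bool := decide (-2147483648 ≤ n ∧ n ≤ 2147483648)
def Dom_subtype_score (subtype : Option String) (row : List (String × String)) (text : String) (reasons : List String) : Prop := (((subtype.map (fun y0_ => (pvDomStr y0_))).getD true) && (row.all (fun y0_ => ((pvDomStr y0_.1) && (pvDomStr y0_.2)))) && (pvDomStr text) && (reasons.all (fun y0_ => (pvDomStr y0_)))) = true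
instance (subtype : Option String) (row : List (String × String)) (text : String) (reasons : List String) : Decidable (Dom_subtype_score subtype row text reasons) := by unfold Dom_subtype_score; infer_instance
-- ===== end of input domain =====

-- B replaces A's single interleaved loop (exact-match test and partial-match tracking per
-- iteration) by a direct keyword lookup keyed on the row's plan category for the 4-case,
-- followed by a separate one-shot partial-match test; objective: simpler.
-- A mutates `reasons` in place; the equivalence proved here is about the RETURN value only
-- (B appends the identical strings in Python).

-- ===== PORT A =====
-- the module constant NON_LIFE_SUBTYPE_KEYWORDS, in source order
def nlKeywords : List (String × List String) :=
  [("personal accident", ["accident", "injury", "意外"]),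
   ("personal liability", ["liability", "責任", "home liability", "家居責任"]),
   ("domestic worker insurance", ["domestic worker", "helper", "maid", "外傭", "工人"]),
   ("domestic helper insurance", ["domestic worker", "helper", "maid", "外傭", "工人"]),
   ("golf insurance", ["golf", "高爾夫"])]

-- the for-loop of A, carrying `best`; casefold = PySem.Str.lower (exact on the ASCII domain)
def loopA (lowered : String) (row : PySem.Dict String String) (text : String) :
    List (String × List String) → Int → Int
  | [], best => if best ≠ 0 then best else -2
  | (category, keywords) :: rest, best =>
    if keywords.any (fun k => PySem.Str.isIn k lowered) then
      if PySem.Str.lower (PySem.Dict.getD row "plan_category" "") = category then 4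
      else if keywords.any (fun k => PySem.Str.isIn k text) then
        loopA lowered row text rest (max best 2)
      else loopA lowered row text rest best
    else loopA lowered row text rest best

def subtype_score (subtype : Option String) (row : List (String × String)) (text : String) (reasons : List String) : Int :=
  match subtype with
  | none => 0
  | some s =>
    if s = "" then 0
    else loopA (PySem.Str.lower s) (PySem.Dict.mk row) text nlKeywords 0

-- ===== PORT B =====
def subtype_score_alt (subtype : Option String) (row : List (String × String)) (text : String) (reasons : List String) : Int :=
  match subtype with
  | none => 0
  | some s =>
    if s = "" then 0
    else
      let lowered := PySem.Str.lower s
      let planCat := PySem.Str.lower (PySem.Dict.getD (PySem.Dict.mk row) "plan_category" "")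
      match PySem.Dict.get? (PySem.Dict.mk nlKeywords) planCat with
      | some kws =>
        if kws.any (fun k => PySem.Str.isIn k lowered) then 4
        else if nlKeywords.any (fun p =>
            p.2.any (fun k => PySem.Str.isIn k lowered) && p.2.any (fun k => PySem.Str.isIn k text))
          then 2 else -2
      | none =>
        if nlKeywords.any (fun p =>
            p.2.any (fun k => PySem.Str.isIn k lowered) && p.2.any (fun k => PySem.Str.isIn k text))
          then 2 else -2

-- ===== PRECONDITION & SPEC =====
def Spec_subtype_score (subtype : Option String) (row : List (String × String)) (text : String) (reasons : List String) (out : Int) : Prop := out = subtype_score_alt subtype row text reasons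
instance (subtype : Option String) (row : List (String × String)) (text : String) (reasons : List String) (out : Int) : Decidable (Spec_subtype_score subtype row text reasons out) := by unfold Spec_subtype_score; infer_instance

-- ===== CLAIM (what is proved, stated in full; the proofs are below) =====
def Claim_equal_subtype_score : Prop := ∀ (subtype : Option String) (row : List (String × String)) (text : String) (reasons : List String), Dom_subtype_score subtype row text reasons → Spec_subtype_score subtype row text reasons (subtype_score subtype row text reasons)

-- ===== LEMMAS AND PROOFS =====

-- if some remaining entry gives an exact plan-category hit, the loop returns 4
lemma loopA_four (lowered : String) (row : PySem.Dict String String) (text : String)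
    (L : List (String × List String)) (best : Int)
    (h : ∃ p ∈ L, p.2.any (fun k => PySem.Str.isIn k lowered) = true ∧
          PySem.Str.lower (PySem.Dict.getD row "plan_category" "") = p.1) :
    loopA lowered row text L best = 4 := by
  induction L generalizing best with
  | nil => simp at h
  | cons p rest ih =>
    obtain ⟨cat, kws⟩ := p
    obtain ⟨q, hq, hkw, heq⟩ := h
    rcases List.mem_cons.mp hq with rfl | hq
    · rw [loopA, if_pos hkw, if_pos heq]
    · by_cases h1 : kws.any (fun k => PySem.Str.isIn k lowered) = true
      · by_cases h2 : PySem.Str.lower (PySem.Dict.getD row "plan_category" "") = cat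
        · rw [loopA, if_pos h1, if_pos h2]
        · by_cases h3 : kws.any (fun k => PySem.Str.isIn k text) = true
          · rw [loopA, if_pos h1, if_neg h2, if_pos h3, ih _ ⟨q, hq, hkw, heq⟩]
          · rw [loopA, if_pos h1, if_neg h2, if_neg h3, ih _ ⟨q, hq, hkw, heq⟩]
      · rw [loopA, if_neg h1, ih _ ⟨q, hq, hkw, heq⟩]

-- with no exact hit remaining, the loop returns 2 iff a partial match was or will be found
lemma loopA_no4 (lowered : String) (row : PySem.Dict String String) (text : String)
    (L : List (String × List String)) (best : Int)
    (h : ∀ p ∈ L, p.2.any (fun k => PySem.Str.isIn k lowered) = true →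
          PySem.Str.lower (PySem.Dict.getD row "plan_category" "") ≠ p.1)
    (hb : best = 0 ∨ best = 2) :
    loopA lowered row text L best =
      if best = 2 ∨ ∃ p ∈ L, p.2.any (fun k => PySem.Str.isIn k lowered) = true ∧
          p.2.any (fun k => PySem.Str.isIn k text) = true
      then 2 else -2 := by
  induction L generalizing best with
  | nil =>
    rcases hb with hb | hb <;> simp [loopA, hb]
  | cons p rest ih =>
    obtain ⟨cat, kws⟩ := p
    by_cases h1 : kws.any (fun k => PySem.Str.isIn k lowered) = true
    · have hne := h (cat, kws) (List.mem_cons_self ..) h1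
      by_cases h3 : kws.any (fun k => PySem.Str.isIn k text) = true
      · have hmax : max best 2 = 2 := by rcases hb with hb | hb <;> simp [hb]
        rw [loopA, if_pos h1, if_neg hne, if_pos h3, hmax,
          ih 2 (fun q hq => h q (List.mem_cons_of_mem _ hq)) (Or.inr rfl),
          if_pos (Or.inl rfl), if_pos (Or.inr ⟨(cat, kws), List.mem_cons_self .., h1, h3⟩)]
      · rw [loopA, if_pos h1, if_neg hne, if_neg h3,
          ih best (fun q hq => h q (List.mem_cons_of_mem _ hq)) hb]
        refine if_congr ⟨fun hc => ?_, fun hc => ?_⟩ rfl rfl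
        · rcases hc with hc | ⟨q, hq, hc⟩
          · exact Or.inl hc
          · exact Or.inr ⟨q, List.mem_cons_of_mem _ hq, hc⟩
        · rcases hc with hc | ⟨q, hq, hc⟩
          · exact Or.inl hc
          · rcases List.mem_cons.mp hq with rfl | hq
            · exact absurd hc.2 h3
            · exact Or.inr ⟨q, hq, hc⟩
    · rw [loopA, if_neg h1, ih best (fun q hq => h q (List.mem_cons_of_mem _ hq)) hb]
      refine if_congr ⟨fun hc => ?_, fun hc => ?_⟩ rfl rfl
      · rcases hc with hc | ⟨q, hq, hc⟩
        · exact Or.inl hc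
        · exact Or.inr ⟨q, List.mem_cons_of_mem _ hq, hc⟩
      · rcases hc with hc | ⟨q, hq, hc⟩
        · exact Or.inl hc
        · rcases List.mem_cons.mp hq with rfl | hq
          · exact absurd hc.1 h1
          · exact Or.inr ⟨q, hq, hc⟩

-- membership of a successful lookup in the literal keyword table
lemma mem_of_get?_nl (k : String) (kws : List String)
    (h : PySem.Dict.get? (PySem.Dict.mk nlKeywords) k = some kws) : (k, kws) ∈ nlKeywords := by
  simp only [PySem.Dict.get?] at h
  rcases hf : List.find? (fun p => p.1 == k) nlKeywords with _ | q <;> rw [hf] at h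
  · simp at h
  · obtain ⟨qk, qv⟩ := q
    simp only [Option.map_some, Option.some.injEq] at h
    subst h
    have hk : qk = k := by simpa using List.find?_some hf
    subst hk
    exact List.mem_of_find?_eq_some hf

-- A's accumulated partial-match condition coincides with B's one-shot any
lemma partial_if_eq (lowered text : String) :
    (if (0 : Int) = 2 ∨ ∃ p ∈ nlKeywords, p.2.any (fun k => PySem.Str.isIn k lowered) = true ∧
        p.2.any (fun k => PySem.Str.isIn k text) = true then (2 : Int) else -2) =
    (if nlKeywords.any (fun p =>
        p.2.any (fun k => PySem.Str.isIn k lowered) && p.2.any (fun k => PySem.Str.isIn k text))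
      then 2 else -2) := by
  refine if_congr ?_ rfl rfl
  rw [List.any_eq_true]
  constructor
  · rintro ((h | ⟨p, hp, h1, h2⟩)); · norm_num at h
    exact ⟨p, hp, by rw [Bool.and_eq_true]; exact ⟨h1, h2⟩⟩
  · rintro ⟨p, hp, h⟩
    rw [Bool.and_eq_true] at h
    exact Or.inr ⟨p, hp, h.1, h.2⟩

-- the exact-hit test of B fails: both sides reduce to the partial-match decision
lemma some_case (lowered text : String) (kws : List String)
    (hkwf : kws.any (fun k => PySem.Str.isIn k lowered) ≠ true) :
    (if (0 : Int) = 2 ∨ ∃ p ∈ nlKeywords, p.2.any (fun k => PySem.Str.isIn k lowered) = true ∧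
        p.2.any (fun k => PySem.Str.isIn k text) = true then (2 : Int) else -2) =
    (if kws.any (fun k => PySem.Str.isIn k lowered) then (4 : Int)
      else if nlKeywords.any (fun p =>
          p.2.any (fun k => PySem.Str.isIn k lowered) && p.2.any (fun k => PySem.Str.isIn k text))
        then 2 else -2) := by
  rw [if_neg hkwf]
  exact partial_if_eq lowered text

-- ===== VERDICT (by name: the statement is the Claim_ definition above) =====
theorem subtype_score_spec : Claim_equal_subtype_score := by
  intro subtype row text reasons _
  unfold Spec_subtype_score
  cases subtype with
  | none => rfl
  | some s =>
    by_cases hs : s = ""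
    · simp [subtype_score, subtype_score_alt, hs]
    · simp only [subtype_score, subtype_score_alt, if_neg hs]
      set lowered := PySem.Str.lower s with hlow_def
      by_cases h4 : ∃ p ∈ nlKeywords, p.2.any (fun k => PySem.Str.isIn k lowered) = true ∧
          PySem.Str.lower (PySem.Dict.getD (PySem.Dict.mk row) "plan_category" "") = p.1
      · rw [loopA_four lowered (PySem.Dict.mk row) text nlKeywords 0 h4]
        simp only [nlKeywords, List.mem_cons, List.not_mem_nil, or_false] at h4
        obtain ⟨p, hp, hkw, heq⟩ := h4
        rcases hp with rfl | rfl | rfl | rfl | rfl <;>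
          · rw [heq]
            exact (if_pos hkw).symm
      · rw [loopA_no4 lowered (PySem.Dict.mk row) text nlKeywords 0
            (by intro p hp hkw heq; exact h4 ⟨p, hp, hkw, heq⟩) (Or.inl rfl)]
        push Not at h4
        rcases hget : PySem.Dict.get? (PySem.Dict.mk nlKeywords)
            (PySem.Str.lower (PySem.Dict.getD (PySem.Dict.mk row) "plan_category" "")) with _ | kws
        · exact partial_if_eq lowered text
        · have hmem : (PySem.Str.lower (PySem.Dict.getD (PySem.Dict.mk row) "plan_category" ""), kws)
              ∈ nlKeywords := mem_of_get?_nl _ _ hget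
          have hkwf : kws.any (fun k => PySem.Str.isIn k lowered) ≠ true := fun hc =>
            h4 _ hmem hc rfl
          exact some_case lowered text kws hkwf
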